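-- pv_equiv track=rewrite | github.com/lky473736/operation-exp | sample/sample_integrated.py | get_feature_info
-- ===== SOURCE A (Python) =====
-- def get_feature_info(config, use_feature_engineering=False):
--     n_operands = config['n_operands']
--
--     if use_feature_engineering:
--         feature_names = [f'operand{i+1}' for i in range(n_operands)] + ['result']
--         feature_types = ['Basic'] * (n_operands + 1)
--
--         # Result-operand relationships
--         for i in range(n_operands):
--             feature_names.extend([
--                 f'res_minus_op{i+1}', f'abs_res_minus_op{i+1}', f'res_div_op{i+1}',
--                 f'res_gt_op{i+1}', f'res_lt_op{i+1}', f'same_sign_res_op{i+1}'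
--             ])
--             feature_types.extend(['Result_Diff', 'Result_AbsDiff', 'Result_Ratio',
--                                 'Result_Comp', 'Result_Comp', 'Result_Sign'] )
--
--         # Pairwise operand relationships
--         for i in range(n_operands):
--             for j in range(i+1, n_operands):
--                 feature_names.extend([
--                     f'op{i+1}_minus_op{j+1}', f'abs_op{i+1}_minus_op{j+1}',
--                     f'op{i+1}_div_op{j+1}', f'op{j+1}_div_op{i+1}',
--                     f'op{i+1}_gt_op{j+1}', f'op{i+1}_eq_op{j+1}'
--                 ])
--                 feature_types.extend(['Pairwise_Diff', 'Pairwise_AbsDiff', 'Pairwise_Ratio',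
--                                     'Pairwise_Ratio', 'Pairwise_Comp', 'Pairwise_Comp'])
--
--         # Global properties
--         feature_names.extend(['res_positive', 'res_negative', 'abs_res', 'sign_res'])
--         feature_types.extend(['Global_Sign', 'Global_Sign', 'Global_Mag', 'Global_Sign'])
--
--         # Operand properties
--         for i in range(n_operands):
--             feature_names.extend([
--                 f'abs_op{i+1}', f'sign_op{i+1}',
--                 f'abs_res_gt_abs_op{i+1}', f'abs_res_lt_abs_op{i+1}'
--             ])
--             feature_types.extend(['Magnitude', 'Sign', 'Magnitude_Comp', 'Magnitude_Comp'])
--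
--         # Scale relationships
--         feature_names.extend([
--             'res_scale_sum', 'res_minus_mean', 'abs_res_minus_mean',
--             'abs_res_gt_max', 'abs_res_lt_min'
--         ])
--         feature_types.extend(['Scale', 'Scale', 'Scale', 'Scale', 'Scale'])
--
--         # Logarithmic features
--         feature_names.append('log_abs_res')
--         feature_types.append('Logarithmic')
--         for i in range(n_operands):
--             feature_names.append(f'log_abs_op{i+1}')
--             feature_types.append('Logarithmic')
--
--         # Type indicators
--         feature_names.append('res_is_int')
--         feature_types.append('Type')
--         for i in range(n_operands):
--             feature_names.append(f'op{i+1}_is_int')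
--             feature_types.append('Type')
--
--         # Reciprocal features
--         feature_names.append('recip_res')
--         feature_types.append('Reciprocal')
--         for i in range(n_operands):
--             feature_names.append(f'recip_op{i+1}')
--             feature_types.append('Reciprocal')
--
--         # Statistical features
--         for i in range(n_operands):
--             feature_names.extend([f'abs_op{i+1}_minus_mean', f'op{i+1}_gt_mean'])
--             feature_types.extend(['Statistical', 'Statistical'])
--
--     else:
--         feature_names = [f'operand{i+1}' for i in range(n_operands)] + ['result']
--         feature_types = ['Basic'] * len(feature_names)
--
--     return feature_names, feature_types
-- ===== SOURCE B (Python) =====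
-- def get_feature_info(config, use_feature_engineering=False):
--     n = config['n_operands']
--     feature_names = [f'operand{i+1}' for i in range(n)] + ['result']
--     if not use_feature_engineering:
--         return feature_names, ['Basic'] * len(feature_names)
--     feature_types = ['Basic'] * (n + 1)
--     groups = [
--         ('per_operand', [(('res_minus_op', ''), 'Result_Diff'),
--                          (('abs_res_minus_op', ''), 'Result_AbsDiff'),
--                          (('res_div_op', ''), 'Result_Ratio'),
--                          (('res_gt_op', ''), 'Result_Comp'),
--                          (('res_lt_op', ''), 'Result_Comp'),
--                          (('same_sign_res_op', ''), 'Result_Sign')]),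
--         ('per_pair', [(('op', '_minus_op', False), 'Pairwise_Diff'),
--                       (('abs_op', '_minus_op', False), 'Pairwise_AbsDiff'),
--                       (('op', '_div_op', False), 'Pairwise_Ratio'),
--                       (('op', '_div_op', True), 'Pairwise_Ratio'),
--                       (('op', '_gt_op', False), 'Pairwise_Comp'),
--                       (('op', '_eq_op', False), 'Pairwise_Comp')]),
--         ('once', [('res_positive', 'Global_Sign'), ('res_negative', 'Global_Sign'),
--                   ('abs_res', 'Global_Mag'), ('sign_res', 'Global_Sign')]),
--         ('per_operand', [(('abs_op', ''), 'Magnitude'),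
--                          (('sign_op', ''), 'Sign'),
--                          (('abs_res_gt_abs_op', ''), 'Magnitude_Comp'),
--                          (('abs_res_lt_abs_op', ''), 'Magnitude_Comp')]),
--         ('once', [('res_scale_sum', 'Scale'), ('res_minus_mean', 'Scale'),
--                   ('abs_res_minus_mean', 'Scale'), ('abs_res_gt_max', 'Scale'),
--                   ('abs_res_lt_min', 'Scale')]),
--         ('once', [('log_abs_res', 'Logarithmic')]),
--         ('per_operand', [(('log_abs_op', ''), 'Logarithmic')]),
--         ('once', [('res_is_int', 'Type')]),
--         ('per_operand', [(('op', '_is_int'), 'Type')]),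
--         ('once', [('recip_res', 'Reciprocal')]),
--         ('per_operand', [(('recip_op', ''), 'Reciprocal')]),
--         ('per_operand', [(('abs_op', '_minus_mean'), 'Statistical'),
--                          (('op', '_gt_mean'), 'Statistical')]),
--     ]
--     for kind, items in groups:
--         if kind == 'once':
--             for name, t in items:
--                 feature_names.append(name)
--                 feature_types.append(t)
--         elif kind == 'per_operand':
--             for i in range(n):
--                 for (pre, suf), t in items:
--                     feature_names.append(pre + str(i + 1) + suf)
--                     feature_types.append(t)
--         else:
--             for i in range(n):
--                 for j in range(i + 1, n):
--                     for (pre, mid, swap), t in items: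
--                         a, b = (j + 1, i + 1) if swap else (i + 1, j + 1)
--                         feature_names.append(pre + str(a) + mid + str(b))
--                         feature_types.append(t)
--     return feature_names, feature_types
-- ===== Notes on version B (the rewrite author's own statement) =====
-- stated objective: alternative
-- what changed: A's ten hand-written emission blocks are replaced by a single generic driver looping over a data table of group specifications (scope once / per_operand / per_pair with name templates), appending names and types in lockstep.
import Mathlib
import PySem

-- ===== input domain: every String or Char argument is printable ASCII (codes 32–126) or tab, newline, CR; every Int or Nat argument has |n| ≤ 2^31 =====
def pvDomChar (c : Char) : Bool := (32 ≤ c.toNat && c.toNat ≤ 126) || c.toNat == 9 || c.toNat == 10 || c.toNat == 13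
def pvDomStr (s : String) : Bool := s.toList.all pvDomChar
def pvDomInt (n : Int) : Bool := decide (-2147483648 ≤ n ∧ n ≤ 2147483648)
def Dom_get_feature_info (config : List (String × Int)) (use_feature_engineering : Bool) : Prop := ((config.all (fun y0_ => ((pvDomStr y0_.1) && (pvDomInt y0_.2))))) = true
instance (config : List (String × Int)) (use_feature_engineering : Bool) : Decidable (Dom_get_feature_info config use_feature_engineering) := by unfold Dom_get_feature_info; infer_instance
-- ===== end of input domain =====

-- B replaces A's ten hand-written emission blocks by one data-driven loop over a list of
-- group specifications (objective: alternative decomposition, same cost).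

-- ===== PORT A =====
-- literal transliteration of Source A: each 'for … extend' loop is a foldl over the same range
-- carrying the (feature_names, feature_types) pair.
def get_feature_info (config : List (String × Int)) (use_feature_engineering : Bool) : List String × List String :=
  match (PySem.Dict.mk config).get? "n_operands" with
  | none => ([], [])  -- unreachable under Pre_ (KeyError in Python)
  | some n_operands =>
    if use_feature_engineering then
      let feature_names := (PySem.List.pyRange 0 n_operands 1).map (fun i => "operand" ++ PySem.Int.toStr (i+1)) ++ ["result"]
      let feature_types := PySem.List.pyRepeat ["Basic"] (n_operands + 1)
      -- Result-operand relationships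
      let s1 := (PySem.List.pyRange 0 n_operands 1).foldl (fun acc i =>
        (acc.1 ++ ["res_minus_op" ++ PySem.Int.toStr (i+1), "abs_res_minus_op" ++ PySem.Int.toStr (i+1),
                   "res_div_op" ++ PySem.Int.toStr (i+1), "res_gt_op" ++ PySem.Int.toStr (i+1),
                   "res_lt_op" ++ PySem.Int.toStr (i+1), "same_sign_res_op" ++ PySem.Int.toStr (i+1)],
         acc.2 ++ ["Result_Diff", "Result_AbsDiff", "Result_Ratio", "Result_Comp", "Result_Comp", "Result_Sign"]))
        (feature_names, feature_types)
      -- Pairwise operand relationships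
      let s2 := (PySem.List.pyRange 0 n_operands 1).foldl (fun acc i =>
        (PySem.List.pyRange (i+1) n_operands 1).foldl (fun acc j =>
          (acc.1 ++ ["op" ++ PySem.Int.toStr (i+1) ++ "_minus_op" ++ PySem.Int.toStr (j+1),
                     "abs_op" ++ PySem.Int.toStr (i+1) ++ "_minus_op" ++ PySem.Int.toStr (j+1),
                     "op" ++ PySem.Int.toStr (i+1) ++ "_div_op" ++ PySem.Int.toStr (j+1),
                     "op" ++ PySem.Int.toStr (j+1) ++ "_div_op" ++ PySem.Int.toStr (i+1),
                     "op" ++ PySem.Int.toStr (i+1) ++ "_gt_op" ++ PySem.Int.toStr (j+1),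
                     "op" ++ PySem.Int.toStr (i+1) ++ "_eq_op" ++ PySem.Int.toStr (j+1)],
           acc.2 ++ ["Pairwise_Diff", "Pairwise_AbsDiff", "Pairwise_Ratio", "Pairwise_Ratio", "Pairwise_Comp", "Pairwise_Comp"])) acc) s1
      -- Global properties
      let s3 := (s2.1 ++ ["res_positive", "res_negative", "abs_res", "sign_res"],
                 s2.2 ++ ["Global_Sign", "Global_Sign", "Global_Mag", "Global_Sign"])
      -- Operand properties
      let s4 := (PySem.List.pyRange 0 n_operands 1).foldl (fun acc i =>
        (acc.1 ++ ["abs_op" ++ PySem.Int.toStr (i+1), "sign_op" ++ PySem.Int.toStr (i+1),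
                   "abs_res_gt_abs_op" ++ PySem.Int.toStr (i+1), "abs_res_lt_abs_op" ++ PySem.Int.toStr (i+1)],
         acc.2 ++ ["Magnitude", "Sign", "Magnitude_Comp", "Magnitude_Comp"])) s3
      -- Scale relationships
      let s5 := (s4.1 ++ ["res_scale_sum", "res_minus_mean", "abs_res_minus_mean", "abs_res_gt_max", "abs_res_lt_min"],
                 s4.2 ++ ["Scale", "Scale", "Scale", "Scale", "Scale"])
      -- Logarithmic features
      let s6 := (s5.1 ++ ["log_abs_res"], s5.2 ++ ["Logarithmic"])
      let s7 := (PySem.List.pyRange 0 n_operands 1).foldl (fun acc i =>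
        (acc.1 ++ ["log_abs_op" ++ PySem.Int.toStr (i+1)], acc.2 ++ ["Logarithmic"])) s6
      -- Type indicators
      let s8 := (s7.1 ++ ["res_is_int"], s7.2 ++ ["Type"])
      let s9 := (PySem.List.pyRange 0 n_operands 1).foldl (fun acc i =>
        (acc.1 ++ ["op" ++ PySem.Int.toStr (i+1) ++ "_is_int"], acc.2 ++ ["Type"])) s8
      -- Reciprocal features
      let s10 := (s9.1 ++ ["recip_res"], s9.2 ++ ["Reciprocal"])
      let s11 := (PySem.List.pyRange 0 n_operands 1).foldl (fun acc i =>
        (acc.1 ++ ["recip_op" ++ PySem.Int.toStr (i+1)], acc.2 ++ ["Reciprocal"])) s10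
      -- Statistical features
      let s12 := (PySem.List.pyRange 0 n_operands 1).foldl (fun acc i =>
        (acc.1 ++ ["abs_op" ++ PySem.Int.toStr (i+1) ++ "_minus_mean", "op" ++ PySem.Int.toStr (i+1) ++ "_gt_mean"],
         acc.2 ++ ["Statistical", "Statistical"])) s11
      s12
    else
      let feature_names := (PySem.List.pyRange 0 n_operands 1).map (fun i => "operand" ++ PySem.Int.toStr (i+1)) ++ ["result"]
      (feature_names, PySem.List.pyRepeat ["Basic"] (PySem.List.len feature_names))

-- ===== PORT B =====
-- group specification: emitted once, per operand (prefix/suffix around str(i+1)),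
-- or per ordered pair i<j (prefix/mid around the two indices, swap reverses them)
inductive PVGroup
| once (items : List (String × String))
| perOp (items : List ((String × String) × String))
| perPair (items : List ((String × String × Bool) × String))

def pvGroups : List PVGroup :=
  [ .perOp [(("res_minus_op", ""), "Result_Diff"), (("abs_res_minus_op", ""), "Result_AbsDiff"),
            (("res_div_op", ""), "Result_Ratio"), (("res_gt_op", ""), "Result_Comp"),
            (("res_lt_op", ""), "Result_Comp"), (("same_sign_res_op", ""), "Result_Sign")],
    .perPair [(("op", "_minus_op", false), "Pairwise_Diff"), (("abs_op", "_minus_op", false), "Pairwise_AbsDiff"),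
              (("op", "_div_op", false), "Pairwise_Ratio"), (("op", "_div_op", true), "Pairwise_Ratio"),
              (("op", "_gt_op", false), "Pairwise_Comp"), (("op", "_eq_op", false), "Pairwise_Comp")],
    .once [("res_positive", "Global_Sign"), ("res_negative", "Global_Sign"),
           ("abs_res", "Global_Mag"), ("sign_res", "Global_Sign")],
    .perOp [(("abs_op", ""), "Magnitude"), (("sign_op", ""), "Sign"),
            (("abs_res_gt_abs_op", ""), "Magnitude_Comp"), (("abs_res_lt_abs_op", ""), "Magnitude_Comp")],
    .once [("res_scale_sum", "Scale"), ("res_minus_mean", "Scale"), ("abs_res_minus_mean", "Scale"),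
           ("abs_res_gt_max", "Scale"), ("abs_res_lt_min", "Scale")],
    .once [("log_abs_res", "Logarithmic")],
    .perOp [(("log_abs_op", ""), "Logarithmic")],
    .once [("res_is_int", "Type")],
    .perOp [(("op", "_is_int"), "Type")],
    .once [("recip_res", "Reciprocal")],
    .perOp [(("recip_op", ""), "Reciprocal")],
    .perOp [(("abs_op", "_minus_mean"), "Statistical"), (("op", "_gt_mean"), "Statistical")] ]

-- the generic driver: one group appended to the (names, types) accumulator
def pvEmit (n : Int) (acc : List String × List String) (g : PVGroup) : List String × List String :=
  match g with
  | .once items => items.foldl (fun acc it => (acc.1 ++ [it.1], acc.2 ++ [it.2])) acc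
  | .perOp items => (PySem.List.pyRange 0 n 1).foldl (fun acc i =>
      items.foldl (fun acc it => (acc.1 ++ [it.1.1 ++ PySem.Int.toStr (i+1) ++ it.1.2], acc.2 ++ [it.2])) acc) acc
  | .perPair items => (PySem.List.pyRange 0 n 1).foldl (fun acc i =>
      (PySem.List.pyRange (i+1) n 1).foldl (fun acc j =>
        items.foldl (fun acc it =>
          let ab := if it.1.2.2 then (j+1, i+1) else (i+1, j+1)
          (acc.1 ++ [it.1.1 ++ PySem.Int.toStr ab.1 ++ it.1.2.1 ++ PySem.Int.toStr ab.2], acc.2 ++ [it.2])) acc) acc) acc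

def get_feature_info_alt (config : List (String × Int)) (use_feature_engineering : Bool) : List String × List String :=
  match (PySem.Dict.mk config).get? "n_operands" with
  | none => ([], [])  -- unreachable under Pre_ (KeyError in Python)
  | some n =>
    let feature_names := (PySem.List.pyRange 0 n 1).map (fun i => "operand" ++ PySem.Int.toStr (i+1)) ++ ["result"]
    if !use_feature_engineering then
      (feature_names, PySem.List.pyRepeat ["Basic"] (PySem.List.len feature_names))
    else
      pvGroups.foldl (pvEmit n) (feature_names, PySem.List.pyRepeat ["Basic"] (n + 1))

-- ===== PRECONDITION & SPEC =====
-- Pre_: the key 'n_operands' is present (Python A raises KeyError otherwise)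
def Pre_get_feature_info (config : List (String × Int)) (use_feature_engineering : Bool) : Prop :=
  ((PySem.Dict.mk config).get? "n_operands").isSome
instance (config : List (String × Int)) (use_feature_engineering : Bool) : Decidable (Pre_get_feature_info config use_feature_engineering) := by unfold Pre_get_feature_info; infer_instance

def pvWitness_get_feature_info : (List (String × Int)) × Bool := ([("n_operands", 2)], true)

def Spec_get_feature_info (config : List (String × Int)) (use_feature_engineering : Bool) (out : List String × List String) : Prop := out = get_feature_info_alt config use_feature_engineering
instance (config : List (String × Int)) (use_feature_engineering : Bool) (out : List String × List String) : Decidable (Spec_get_feature_info config use_feature_engineering out) := by unfold Spec_get_feature_info; infer_instance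

-- ===== CLAIM (what is proved, stated in full; the proofs are below) =====
def Claim_equal_get_feature_info : Prop := ∀ (config : List (String × Int)) (use_feature_engineering : Bool), Dom_get_feature_info config use_feature_engineering → Pre_get_feature_info config use_feature_engineering → Spec_get_feature_info config use_feature_engineering (get_feature_info config use_feature_engineering)

-- ===== LEMMAS AND PROOFS =====
-- a loop that appends to both components of a pair is the pair of flatMaps
theorem pv_foldl_pair_append {α β : Type} (f g : α → List β) (l : List α) (p : List β × List β) :
    l.foldl (fun acc i => (acc.1 ++ f i, acc.2 ++ g i)) p = (p.1 ++ l.flatMap f, p.2 ++ l.flatMap g) := by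
  induction l generalizing p with
  | nil => simp
  | cons x xs ih => simp [ih, List.append_assoc]

theorem get_feature_info_spec : Claim_equal_get_feature_info := by
  intro config ufe _ _
  unfold Spec_get_feature_info get_feature_info get_feature_info_alt
  cases h : (PySem.Dict.mk config).get? "n_operands" with
  | none => rfl
  | some n =>
    cases ufe with
    | false => rfl
    | true =>
      simp only [Bool.not_true, if_true, if_false, Bool.false_eq_true, ite_false, ite_true,
        pvGroups, List.foldl_cons, List.foldl_nil, pvEmit,
        List.foldl_cons, List.foldl_nil, pv_foldl_pair_append, List.flatMap_cons, List.flatMap_nil,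
        List.append_assoc, List.append_nil, if_false, if_true, Bool.true_eq_false,
        String.append_empty, List.singleton_append, List.cons_append, List.nil_append]
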